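/- GENERATED by farm/mkstatement.py from design/units.tsv (unit `start_decoder.C10`) and the assertions of Vorbis/Spec/StartDecoderA.lean — do not edit.
   THE STATEMENT of the proof unit `start_decoder.C10`: segment C10 of `start_decoder` (2 instructions; entries 0x114788;
   exits 0x114298; ranges 0x114788-0x11478d)
   takes each of its entry assertions to one of its exit assertions (`Vorbis.Spec.StartDecoder.SegC10`), given the contracts of its callees.
   What the names mean: Vorbis/Spec/Basic.lean (the shared hypotheses), Vorbis/Spec/StartDecoderA.lean (the assertions). The theorem to prove:
   `theorem start_decoder_C10_ok : Vorbis.Spec.start_decoder_C10.Statement`. -/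
import Vorbis.Spec.StartDecoderA
namespace Vorbis.Spec.start_decoder_C10
open X86 X86.User Asan

/-- The statement of unit `start_decoder.C10`. -/
def Statement : Prop :=
  ∀ (Lay : Layout) (_hLay : Lay.hi = 0x1000000) (μ : Microarch) (_hμ : UserX.MicroOK μ) (u₀ : State)
    (_hcode : HasCodeNat Lay u₀ Vorbis.L.start_decoder.entry Vorbis.Code.code_start_decoder.nat Vorbis.L.start_decoder.size),
    Vorbis.Spec.StartDecoder.SegC10 Lay μ u₀

end Vorbis.Spec.start_decoder_C10
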